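-- pv_equiv track=rewrite | github.com/aquastripe/problem-solving | codeforces/1971 Div4/D.py | solve
-- ===== SOURCE A (Python) =====
-- def solve(s):
--     ans = 1
--     count_zeros_to_ones = 0
--     for i in range(1, len(s)):
--         if s[i - 1] != s[i]:
--             ans += 1
--
--             if s[i - 1] == '0':
--                 count_zeros_to_ones += 1
--
--     if count_zeros_to_ones > 0:
--         ans -= 1
--
--     return ans
-- ===== SOURCE B (Python) =====
-- def solve(s):
--     # Build the run-length block list (one entry per maximal run), then
--     # answer = number of blocks, minus 1 if some '0' block is not the last one.
--     blocks = []
--     n = len(s)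
--     i = 0
--     while i < n:
--         c = s[i]
--         blocks.append(c)
--         while i < n and s[i] == c:
--             i += 1
--     ans = len(blocks) if blocks else 1
--     if '0' in blocks[:-1]:
--         ans -= 1
--     return ans
-- ===== Notes on version B (the rewrite author's own statement) =====
-- stated objective: alternative
-- what changed: B materialises the run-length block list (outer loop per block, inner loop skipping each run) and computes the answer as len(blocks) minus 1 iff '0' occurs among the non-final blocks, instead of A's single pairwise-comparison loop with a transition counter.
import Mathlib
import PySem

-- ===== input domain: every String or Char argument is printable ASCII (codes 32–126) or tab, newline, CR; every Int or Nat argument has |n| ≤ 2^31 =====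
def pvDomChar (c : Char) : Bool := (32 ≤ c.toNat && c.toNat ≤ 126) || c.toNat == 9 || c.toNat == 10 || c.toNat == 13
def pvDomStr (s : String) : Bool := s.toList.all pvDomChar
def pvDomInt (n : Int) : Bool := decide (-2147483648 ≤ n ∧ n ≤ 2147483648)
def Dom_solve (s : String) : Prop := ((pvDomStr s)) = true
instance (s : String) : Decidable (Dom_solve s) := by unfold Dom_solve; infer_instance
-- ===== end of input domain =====

-- B builds the block (run-length key) list and derives the answer from it; A counts transitions in one pairwise loop. Same values everywhere; objective: alternative.

-- ===== PORT A =====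
-- A's loop over i in range(1, len(s)): comparing s[i-1] with s[i] becomes a
-- structural recursion carrying the previous character; state (ans, count_zeros_to_ones).
def solveLoop (prev : Char) (rest : List Char) (ans : Int) (cnt : Int) : Int × Int :=
  match rest with
  | [] => (ans, cnt)
  | c :: rest' =>
    if prev ≠ c then
      solveLoop c rest' (ans + 1) (if prev = '0' then cnt + 1 else cnt)
    else
      solveLoop c rest' ans cnt

def solve (s : String) : Int :=
  let st :=
    match s.toList with
    | [] => ((1 : Int), (0 : Int))
    | c :: rest => solveLoop c rest 1 0
  if st.2 > 0 then st.1 - 1 else st.1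

-- ===== PORT B =====
-- Source B's outer while appends the first char of each run and the inner while
-- skips the rest of the run: recursion that drops the run with dropWhile.
def groupKeys : List Char → List Char
  | [] => []
  | c :: rest => c :: groupKeys (rest.dropWhile (· == c))
termination_by l => l.length
decreasing_by
  exact Nat.lt_succ_of_le (List.length_dropWhile_le (· == c) rest)

def solve_alt (s : String) : Int :=
  let blocks := groupKeys s.toList
  let ans : Int := if blocks.isEmpty then 1 else (blocks.length : Int)
  if blocks.dropLast.contains '0' then ans - 1 else ans

-- ===== PRECONDITION & SPEC =====
def Spec_solve (s : String) (out : Int) : Prop := out = solve_alt s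
instance (s : String) (out : Int) : Decidable (Spec_solve s out) := by unfold Spec_solve; infer_instance

-- ===== CLAIM (what is proved, stated in full; the proofs are below) =====
def Claim_equal_solve : Prop := ∀ (s : String), Dom_solve s → Spec_solve s (solve s)

-- ===== LEMMAS AND PROOFS =====

theorem groupKeys_nil : groupKeys [] = [] := by
  rw [groupKeys.eq_def]

theorem groupKeys_cons (c : Char) (rest : List Char) :
    groupKeys (c :: rest) = c :: groupKeys (rest.dropWhile (· == c)) := by
  rw [groupKeys.eq_def]

theorem gk_cons_eq (c : Char) (rest : List Char) :
    groupKeys (c :: c :: rest) = groupKeys (c :: rest) := by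
  rw [groupKeys_cons, groupKeys_cons c rest]
  simp [List.dropWhile]

theorem gk_cons_ne {prev c : Char} (h : prev ≠ c) (rest : List Char) :
    groupKeys (prev :: c :: rest) = prev :: groupKeys (c :: rest) := by
  rw [groupKeys_cons]
  rw [List.dropWhile, show (c == prev) = false from beq_eq_false_iff_ne.mpr (Ne.symm h)]

theorem loop_fst (rest : List Char) : ∀ (prev : Char) (ans cnt : Int),
    (solveLoop prev rest ans cnt).1 = ans - 1 + ((groupKeys (prev :: rest)).length : Int) := by
  induction rest with
  | nil => intro prev ans cnt; simp [solveLoop, groupKeys_cons, groupKeys_nil]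
  | cons c rest ih =>
    intro prev ans cnt
    by_cases h : prev = c
    · subst h
      rw [gk_cons_eq]
      simpa [solveLoop] using ih prev ans cnt
    · rw [gk_cons_ne h]
      simp only [solveLoop, if_pos h]
      rw [ih]
      simp only [List.length_cons]
      push_cast
      ring

theorem loop_snd (rest : List Char) : ∀ (prev : Char) (ans cnt : Int), 0 ≤ cnt →
    ((solveLoop prev rest ans cnt).2 > 0 ↔
      cnt > 0 ∨ '0' ∈ (groupKeys (prev :: rest)).dropLast) := by
  induction rest with
  | nil => intro prev ans cnt _; simp [solveLoop, groupKeys_cons, groupKeys_nil]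
  | cons c rest ih =>
    intro prev ans cnt hcnt
    by_cases h : prev = c
    · subst h
      rw [gk_cons_eq]
      simpa [solveLoop] using ih prev ans cnt hcnt
    · rw [gk_cons_ne h]
      simp only [solveLoop, if_pos h]
      obtain ⟨b, bl, hb⟩ : ∃ b bl, groupKeys (c :: rest) = b :: bl := by
        rw [groupKeys_cons]; exact ⟨_, _, rfl⟩
      by_cases hz : prev = '0'
      · rw [if_pos hz, ih _ _ _ (by omega), hb]
        subst hz
        simp [List.dropLast]
        omega
      · rw [if_neg hz, ih _ _ _ hcnt, hb]
        simp [List.dropLast, Ne.symm hz]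

-- ===== VERDICT (by name: the statement is the Claim_ definition above) =====
theorem solve_spec : Claim_equal_solve := by
  intro s _
  unfold Spec_solve solve solve_alt
  cases hs : s.toList with
  | nil => simp [groupKeys_nil]
  | cons c rest =>
    have h1 := loop_fst rest c 1 0
    have h2 := loop_snd rest c 1 0 le_rfl
    obtain ⟨b, bl, hb⟩ : ∃ b bl, groupKeys (c :: rest) = b :: bl := by
      rw [groupKeys_cons]; exact ⟨_, _, rfl⟩
    simp only [hb] at h1 h2 ⊢
    simp only [List.isEmpty_cons, List.contains_eq_mem, decide_eq_true_eq, if_neg Bool.false_ne_true]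
    by_cases hm : '0' ∈ (b :: bl).dropLast
    · rw [if_pos (by rw [h2]; simp [hm]), if_pos hm, h1]
      simp only [List.length_cons]; push_cast; ring
    · rw [if_neg (by rw [h2]; simp [hm]), if_neg hm, h1]
      simp only [List.length_cons]; push_cast; ring
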